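-- pv_equiv track=rewrite | github.com/KhabbabZakaria/foobar | Expanding Nebula/9.py | solution
-- ===== SOURCE A (Python) =====
-- def return_conjugations(a,b,c,d):
--     return (a&~b&~c&~d) | (~a&b&~c&~d) | (~a&~b&c&~d) | (~a&~b&~c&d)
--
-- def generate_comb(val1,val2,bitlen):
--     a = val1 & ~(1<<bitlen) #left shift
--     b = val2 & ~(1<<bitlen)
--     c = val1 >> 1 #right shift
--     d = val2 >> 1
--     return return_conjugations(a,b,c,d)
--
-- def mapping_helper(generation, i, j, keylist, mapping):
--     if (generation, i) in keylist:
--         val = mapping[(generation, i)]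
--         val.append(j)
--         return val
--     return [j]
--
-- def mapping_fn(len, nums):
--     mapping = {}
--     nums = set(nums)
--     for i in range(1<<(len+1)):
--         for j in range(1<<(len+1)):
--             generation = generate_comb(i,j,len)
--             if generation in nums:
--                 keylist = list(mapping.keys())
--                 mapping[(generation,i)] = mapping_helper(generation, i, j, keylist, mapping)
--
--     return mapping
--
-- def solution(matrix):
--     matrix = list(zip(*matrix)) # transpose
--
--     # turn map into numbers
--     nums = []
--     for i in range(len(matrix)):
--         tmp = []
--         for j in range(len(matrix[i])):
--             if matrix[i][j]:
--                 tmp.append(1<<j)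
--             else:
--                 tmp.append(0)
--         nums.append(sum(tmp))
--
--     mapping = mapping_fn(len(matrix[0]), nums)
--
--     preimage = {i: 1 for i in range(1<<(len(matrix[0])+1))}
--     for row in nums:
--         next_row = {}
--         for c1 in preimage:
--             keylist = list(mapping.keys())
--             if (row, c1) not in keylist:
--                 mapping[(row, c1)] = []
--             for c2 in mapping[(row, c1)]:
--                 keylist = list(next_row.keys())
--                 if c2 in keylist:
--                     next_row[c2] += preimage[c1]
--                 else:
--                     next_row[c2] = preimage[c1]
--         preimage = next_row
--     ret = sum(preimage.values())
--
--     return ret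
-- ===== SOURCE B (Python) =====
-- def _produced(c1, c2, h):
--     # column mask produced by two adjacent preimage columns c1, c2 (h+1 bits each):
--     # output bit k is set iff exactly one of c1[k], c2[k], c1[k+1], c2[k+1] is set
--     a = c1 & ~(1 << h)
--     b = c2 & ~(1 << h)
--     c = c1 >> 1
--     d = c2 >> 1
--     return (a & ~b & ~c & ~d) | (~a & b & ~c & ~d) | (~a & ~b & c & ~d) | (~a & ~b & ~c & d)
--
-- def solution(matrix):
--     h = len(matrix)
--     w = min(len(row) for row in matrix)
--     full = 1 << (h + 1)
--     counts = {c: 1 for c in range(full)}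
--     for i in range(w):
--         col = sum(1 << j for j in range(h) if matrix[j][i])
--         nxt = {}
--         for c1, cnt in counts.items():
--             for c2 in range(full):
--                 if _produced(c1, c2, h) == col:
--                     nxt[c2] = nxt.get(c2, 0) + cnt
--         counts = nxt
--     return sum(counts.values())
-- ===== Notes on version B (the rewrite author's own statement) =====
-- stated objective: simpler
-- what changed: B drops A's transpose and its precomputed (generation,column)->successors mapping table: it DPs over output columns directly on the input matrix, testing the 2x2 exactly-one-of-four expansion rule inline for each candidate successor column, and it also avoids A's repeated list(mapping.keys())/list(next_row.keys()) materialisations by using dict.get.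
import Mathlib
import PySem

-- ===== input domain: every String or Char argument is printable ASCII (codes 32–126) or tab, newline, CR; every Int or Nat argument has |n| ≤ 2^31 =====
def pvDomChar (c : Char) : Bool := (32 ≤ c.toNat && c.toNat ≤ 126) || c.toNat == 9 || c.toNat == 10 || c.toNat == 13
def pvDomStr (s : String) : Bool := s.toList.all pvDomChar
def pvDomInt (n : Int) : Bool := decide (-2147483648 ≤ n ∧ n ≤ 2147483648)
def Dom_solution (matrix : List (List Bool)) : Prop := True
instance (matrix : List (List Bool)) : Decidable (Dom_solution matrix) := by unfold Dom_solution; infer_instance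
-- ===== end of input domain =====

-- B removes A's transpose and its precomputed (column, predecessor) -> successors table and instead
-- runs the column DP directly on the input, testing the 2x2 expansion rule inline (objective: simpler).

-- ===== PORT A =====
def return_conjugations (a b c d : Int) : Int :=
  PySem.Int.bor (PySem.Int.bor (PySem.Int.bor
    (PySem.Int.band (PySem.Int.band (PySem.Int.band a (Int.not b)) (Int.not c)) (Int.not d))
    (PySem.Int.band (PySem.Int.band (PySem.Int.band (Int.not a) b) (Int.not c)) (Int.not d)))
    (PySem.Int.band (PySem.Int.band (PySem.Int.band (Int.not a) (Int.not b)) c) (Int.not d)))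
    (PySem.Int.band (PySem.Int.band (PySem.Int.band (Int.not a) (Int.not b)) (Int.not c)) d)

def generate_comb (val1 val2 bitlen : Int) : Int :=
  -- bitlen ≥ 0 at every call site (it is a list length), so '1 << bitlen' is 1 <<< bitlen.toNat exactly
  let a := PySem.Int.band val1 (Int.not ((1:Int) <<< bitlen.toNat))
  let b := PySem.Int.band val2 (Int.not ((1:Int) <<< bitlen.toNat))
  let c := val1 >>> (1:Nat)
  let d := val2 >>> (1:Nat)
  return_conjugations a b c d

def mapping_helper (generation i j : Int) (keylist : List (Int × Int))
    (mapping : PySem.Dict (Int × Int) (List Int)) : List Int :=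
  if (generation, i) ∈ keylist then (mapping.getD (generation, i) []) ++ [j] else [j]

def mapping_fn (len_ : Int) (nums : List Int) : PySem.Dict (Int × Int) (List Int) :=
  let numsSet := PySem.Set.ofList nums
  (PySem.List.pyRange 0 ((1:Int) <<< (len_ + 1).toNat) 1).foldl (fun mapping i =>
    (PySem.List.pyRange 0 ((1:Int) <<< (len_ + 1).toNat) 1).foldl (fun mapping j =>
      let generation := generate_comb i j len_
      if generation ∈ numsSet then
        let keylist := mapping.keys
        mapping.insert (generation, i) (mapping_helper generation i j keylist mapping)
      else mapping) mapping) PySem.Dict.empty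

-- exact port of list(zip(*matrix)): truncating transpose, tuples represented as lists
def pyZipT (m : List (List Bool)) : List (List Bool) :=
  match m with
  | [] => []
  | _ :: _ =>
    (List.range ((m.map List.length).min?.getD 0)).map
      (fun i => m.map (fun row => row.getD i false))

def solution (matrix : List (List Bool)) : Int :=
  let matrix' := pyZipT matrix
  let nums : List Int :=
    (PySem.List.pyRange 0 (PySem.List.len matrix') 1).foldl (fun nums i =>
      let row := PySem.List.pyGetD matrix' i []
      let tmp : List Int :=
        (PySem.List.pyRange 0 (PySem.List.len row) 1).foldl (fun tmp j =>
          if PySem.List.pyGetD row j false then tmp ++ [(1:Int) <<< j.toNat]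
          else tmp ++ [(0:Int)]) []
      nums ++ [tmp.sum]) []
  -- matrix[0] raises IndexError when the transpose is empty; those inputs are excluded by Pre_
  let len0 : Int := PySem.List.len ((PySem.List.pyGet? matrix' 0).getD [])
  let mapping := mapping_fn len0 nums
  let preimage : PySem.Dict Int Int :=
    (PySem.List.pyRange 0 ((1:Int) <<< (len0 + 1).toNat) 1).foldl
      (fun d i => d.insert i 1) PySem.Dict.empty
  let final := nums.foldl
    (fun (st : PySem.Dict (Int × Int) (List Int) × PySem.Dict Int Int) row =>
      let mapping := st.1
      let preimage := st.2
      preimage.keys.foldl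
        (fun (st2 : PySem.Dict (Int × Int) (List Int) × PySem.Dict Int Int) c1 =>
          let mapping := st2.1
          let next_row := st2.2
          let mapping :=
            if (row, c1) ∈ mapping.keys then mapping else mapping.insert (row, c1) []
          let next_row := (mapping.getD (row, c1) []).foldl (fun nr c2 =>
              if c2 ∈ nr.keys then nr.insert c2 (nr.getD c2 0 + preimage.getD c1 0)
              else nr.insert c2 (preimage.getD c1 0)) next_row
          (mapping, next_row)) (mapping, PySem.Dict.empty))
    (mapping, preimage)
  (final.2).values.sum

-- ===== PORT B =====
def produced (c1 c2 h : Int) : Int :=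
  let a := PySem.Int.band c1 (Int.not ((1:Int) <<< h.toNat))
  let b := PySem.Int.band c2 (Int.not ((1:Int) <<< h.toNat))
  let c := c1 >>> (1:Nat)
  let d := c2 >>> (1:Nat)
  PySem.Int.bor (PySem.Int.bor (PySem.Int.bor
    (PySem.Int.band (PySem.Int.band (PySem.Int.band a (Int.not b)) (Int.not c)) (Int.not d))
    (PySem.Int.band (PySem.Int.band (PySem.Int.band (Int.not a) b) (Int.not c)) (Int.not d)))
    (PySem.Int.band (PySem.Int.band (PySem.Int.band (Int.not a) (Int.not b)) c) (Int.not d)))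
    (PySem.Int.band (PySem.Int.band (PySem.Int.band (Int.not a) (Int.not b)) (Int.not c)) d)

def solution_alt (matrix : List (List Bool)) : Int :=
  let h := PySem.List.len matrix
  -- min(len(row) for row in matrix): lengths are Nat, min cast to Int (raises on [], excluded by Pre_)
  let w : Int := (((matrix.map List.length).min?.getD 0 : Nat) : Int)
  let full : Int := (1:Int) <<< (h + 1).toNat
  let counts0 : PySem.Dict Int Int :=
    (PySem.List.pyRange 0 full 1).foldl (fun d c => d.insert c 1) PySem.Dict.empty
  let final := (PySem.List.pyRange 0 w 1).foldl (fun counts i =>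
      let col : Int := (((PySem.List.pyRange 0 h 1).filter
          (fun j => PySem.List.pyGetD (PySem.List.pyGetD matrix j []) i false)).map
          (fun j => (1:Int) <<< j.toNat)).sum
      counts.items.foldl (fun nxt p =>
          (PySem.List.pyRange 0 full 1).foldl (fun nxt c2 =>
            if produced p.1 c2 h = col then nxt.insert c2 (nxt.getD c2 0 + p.2) else nxt) nxt)
        PySem.Dict.empty) counts0
  final.values.sum

-- ===== PRECONDITION & SPEC =====
-- A raises IndexError on the empty matrix and on any matrix with an empty row (the transpose is empty
-- and matrix[0] fails); exactly those inputs are excluded.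
def Pre_solution (matrix : List (List Bool)) : Prop := matrix ≠ [] ∧ ∀ r ∈ matrix, r ≠ []
instance (matrix : List (List Bool)) : Decidable (Pre_solution matrix) := by
  unfold Pre_solution; infer_instance
def pvWitness_solution : List (List Bool) := [[true]]

def Spec_solution (matrix : List (List Bool)) (out : Int) : Prop := out = solution_alt matrix
instance (matrix : List (List Bool)) (out : Int) : Decidable (Spec_solution matrix out) := by
  unfold Spec_solution; infer_instance

-- ===== CLAIM (what is proved, stated in full; the proofs are below) =====
def Claim_equal_solution : Prop :=
  ∀ (matrix : List (List Bool)), Dom_solution matrix → Pre_solution matrix →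
    Spec_solution matrix (solution matrix)

-- ===== LEMMAS AND PROOFS =====

-- canonical intermediate forms shared by both directions of the proof
def pvRng (L : Int) : List Int := PySem.List.pyRange 0 ((1:Int) <<< (L + 1).toNat) 1

def pvMatches (L row c1 : Int) : List Int :=
  (pvRng L).filter (fun j => decide (generate_comb c1 j L = row))

def pvMstep (L : Int) (S : PySem.Set Int) (i : Int)
    (m : PySem.Dict (Int × Int) (List Int)) (j : Int) : PySem.Dict (Int × Int) (List Int) :=
  if generate_comb i j L ∈ S then
    m.insert (generate_comb i j L, i) (m.getD (generate_comb i j L, i) [] ++ [j])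
  else m

def pvMinv (L : Int) (nums : List Int) (m : PySem.Dict (Int × Int) (List Int)) : Prop :=
  ∀ row c1, row ∈ nums → c1 ∈ pvRng L → m.getD (row, c1) [] = pvMatches L row c1

def pvStepD (L row : Int) (p : PySem.Dict Int Int) : PySem.Dict Int Int :=
  p.keys.foldl (fun nr c1 =>
      (pvMatches L row c1).foldl (fun nr c2 => nr.insert c2 (nr.getD c2 0 + p.getD c1 0)) nr)
    PySem.Dict.empty

def pvInit (L : Int) : PySem.Dict Int Int :=
  (pvRng L).foldl (fun d i => d.insert i 1) PySem.Dict.empty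

-- the literal inner-loop body of A's DP (named so that `solution_eq` is `rfl`)
def pvAbody (row : Int) (preimage : PySem.Dict Int Int)
    (st2 : PySem.Dict (Int × Int) (List Int) × PySem.Dict Int Int) (c1 : Int) :
    PySem.Dict (Int × Int) (List Int) × PySem.Dict Int Int :=
  let mapping := st2.1
  let next_row := st2.2
  let mapping := if (row, c1) ∈ mapping.keys then mapping else mapping.insert (row, c1) []
  let next_row := (mapping.getD (row, c1) []).foldl (fun nr c2 =>
      if c2 ∈ nr.keys then nr.insert c2 (nr.getD c2 0 + preimage.getD c1 0)
      else nr.insert c2 (preimage.getD c1 0)) next_row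
  (mapping, next_row)

def pvRowMask (row : List Bool) : Int :=
  ((List.range row.length).map (fun k => if row.getD k false then (1:Int) <<< k else 0)).sum

def pvColMask (matrix : List (List Bool)) (i : Nat) : Int :=
  pvRowMask (matrix.map (fun r => r.getD i false))

def pvW (matrix : List (List Bool)) : Nat := ((matrix.map List.length).min?.getD 0)

def pvCols (matrix : List (List Bool)) : List Int :=
  (List.range (pvW matrix)).map (pvColMask matrix)

lemma helper_eq (g i j : Int) (m : PySem.Dict (Int × Int) (List Int)) :
    mapping_helper g i j m.keys m = m.getD (g, i) [] ++ [j] := by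
  unfold mapping_helper
  by_cases h : (g, i) ∈ m.keys
  · simp [h]
  · have hc : m.contains (g, i) = false := by
      rw [← Bool.not_eq_true, PySem.Dict.contains_iff_mem_keys]; exact h
    simp [h, PySem.Dict.getD_of_not_contains _ _ hc]

lemma mapping_fn_eq (L : Int) (nums : List Int) :
    mapping_fn L nums =
      (pvRng L).foldl (fun m i => (pvRng L).foldl (pvMstep L (PySem.Set.ofList nums) i) m)
        PySem.Dict.empty := by
  simp only [mapping_fn, pvRng, helper_eq]
  rfl

lemma mstep_fold_getD (L : Int) (S : PySem.Set Int) (i : Int) (js : List Int)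
    (m : PySem.Dict (Int × Int) (List Int)) (row c1 : Int) :
    (js.foldl (pvMstep L S i) m).getD (row, c1) []
      = m.getD (row, c1) [] ++
        (if c1 = i ∧ row ∈ S then js.filter (fun j => decide (generate_comb i j L = row)) else []) := by
  induction js generalizing m with
  | nil => simp
  | cons j js ih =>
    simp only [List.foldl_cons, List.filter_cons]
    rw [ih]
    show (pvMstep L S i m j).getD (row, c1) [] ++ _ = _
    unfold pvMstep
    by_cases hs : generate_comb i j L ∈ S
    · rw [if_pos hs, PySem.Dict.getD_insert]
      by_cases hkey : (row, c1) = (generate_comb i j L, i)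
      · rw [if_pos hkey]
        obtain ⟨hr, hc⟩ := Prod.mk.injEq _ _ _ _ ▸ hkey
        subst hr; subst hc
        simp [hs, List.append_assoc]
      · rw [if_neg hkey]
        by_cases hci : c1 = i
        · subst hci
          have hne : decide (generate_comb c1 j L = row) = false := by
            simp only [decide_eq_false_iff_not]
            intro he
            exact hkey (by rw [he])
          simp [hne]
        · simp [hci]
    · rw [if_neg hs]
      by_cases hci : c1 = i
      · subst hci
        by_cases hrS : row ∈ S
        · have hne : decide (generate_comb c1 j L = row) = false := by
            simp only [decide_eq_false_iff_not]
            intro he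
            exact hs (he ▸ hrS)
          simp [hne, hrS]
        · simp [hrS]
      · simp [hci]

lemma mfold_getD (L : Int) (S : PySem.Set Int) (is js : List Int) (hnd : is.Nodup)
    (m : PySem.Dict (Int × Int) (List Int)) (row c1 : Int) :
    (is.foldl (fun m i => js.foldl (pvMstep L S i) m) m).getD (row, c1) []
      = m.getD (row, c1) [] ++
        (if c1 ∈ is ∧ row ∈ S then js.filter (fun j => decide (generate_comb c1 j L = row)) else []) := by
  induction is generalizing m with
  | nil => simp
  | cons i is ih =>
    simp only [List.foldl_cons]
    rw [ih (List.nodup_cons.1 hnd).2, mstep_fold_getD]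
    by_cases hci : c1 = i
    · subst hci
      have hni : c1 ∉ is := (List.nodup_cons.1 hnd).1
      by_cases hrS : row ∈ S
      · simp [hni, hrS]
      · simp [hrS]
    · simp [hci, List.mem_cons]

lemma mapping_fn_minv (L : Int) (nums : List Int) : pvMinv L nums (mapping_fn L nums) := by
  intro row c1 hrow hc1
  rw [mapping_fn_eq, mfold_getD _ _ _ _ (by
    unfold pvRng
    exact PySem.List.nodup_pyRange_one _ _)]
  have hrS : row ∈ PySem.Set.ofList nums := (PySem.Set.mem_ofList _ _).2 hrow
  simp [hc1, hrS, pvMatches, PySem.Dict.getD_empty]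

lemma inner_body_eq (pv : Int) :
    (fun (nr : PySem.Dict Int Int) c2 =>
        if c2 ∈ nr.keys then nr.insert c2 (nr.getD c2 0 + pv) else nr.insert c2 pv)
      = fun nr c2 => nr.insert c2 (nr.getD c2 0 + pv) := by
  funext nr c2
  by_cases h : c2 ∈ nr.keys
  · simp [h]
  · have hc : nr.contains c2 = false := by
      rw [← Bool.not_eq_true, PySem.Dict.contains_iff_mem_keys]; exact h
    simp [h, PySem.Dict.getD_of_not_contains _ _ hc]

lemma Arow (L : Int) (nums : List Int) (row : Int) (hrow : row ∈ nums)
    (ks : List Int) (hks : ∀ c1 ∈ ks, c1 ∈ pvRng L)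
    (m : PySem.Dict (Int × Int) (List Int)) (hm : pvMinv L nums m)
    (p nr : PySem.Dict Int Int) :
    pvMinv L nums (ks.foldl (pvAbody row p) (m, nr)).1 ∧
    (ks.foldl (pvAbody row p) (m, nr)).2
      = ks.foldl (fun nr c1 =>
          (pvMatches L row c1).foldl (fun nr c2 => nr.insert c2 (nr.getD c2 0 + p.getD c1 0)) nr) nr := by
  induction ks generalizing m nr with
  | nil => exact ⟨hm, rfl⟩
  | cons c1 ks ih =>
    have hc1 : c1 ∈ pvRng L := hks c1 (List.mem_cons_self)
    have hks' : ∀ c ∈ ks, c ∈ pvRng L := fun c hc => hks c (List.mem_cons_of_mem _ hc)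
    -- the conditionally updated mapping
    set m' := if (row, c1) ∈ m.keys then m else m.insert (row, c1) [] with hm'def
    have hm' : pvMinv L nums m' := by
      rw [hm'def]
      split
      · exact hm
      · next hmem =>
        intro row' c1' h1 h2
        rw [PySem.Dict.getD_insert]
        split
        · next hkey =>
          obtain ⟨hr, hc⟩ := Prod.mk.injEq _ _ _ _ ▸ hkey
          subst hr; subst hc
          have hc0 : m.contains (row', c1') = false := by
            rw [← Bool.not_eq_true, PySem.Dict.contains_iff_mem_keys]; exact hmem
          have := hm row' c1' h1 h2
          rw [PySem.Dict.getD_of_not_contains _ _ hc0] at this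
          exact this
        · exact hm row' c1' h1 h2
    have hget : m'.getD (row, c1) [] = pvMatches L row c1 := by
      rw [hm'def]
      split
      · exact hm row c1 hrow hc1
      · next hmem =>
        have hc0 : m.contains (row, c1) = false := by
          rw [← Bool.not_eq_true, PySem.Dict.contains_iff_mem_keys]; exact hmem
        have := hm row c1 hrow hc1
        rw [PySem.Dict.getD_of_not_contains _ _ hc0] at this
        rw [PySem.Dict.getD_insert]
        simp [← this]
    have hstep : pvAbody row p (m, nr) c1
        = (m', (pvMatches L row c1).foldl
            (fun nr c2 => nr.insert c2 (nr.getD c2 0 + p.getD c1 0)) nr) := by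
      unfold pvAbody
      rw [inner_body_eq]
      simp only [← hm'def, hget]
    simp only [List.foldl_cons, hstep]
    exact ih hks' m' hm' _

lemma stepD_sub_aux (L row : Int) (p : PySem.Dict Int Int) (ks : List Int)
    (nr : PySem.Dict Int Int) (hnr : ∀ k ∈ nr.keys, k ∈ pvRng L) :
    ∀ k ∈ (ks.foldl (fun nr c1 =>
        (pvMatches L row c1).foldl (fun nr c2 => nr.insert c2 (nr.getD c2 0 + p.getD c1 0)) nr)
        nr).keys, k ∈ pvRng L := by
  induction ks generalizing nr with
  | nil => exact hnr
  | cons c1 ks ih =>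
    simp only [List.foldl_cons]
    refine ih _ ?_
    intro k hk
    rw [PySem.Dict.keys_foldl_insert (f := fun d x => d.getD x 0 + p.getD c1 0)] at hk
    rcases (PySem.Set.mem_update _ _ _).1 hk with h | h
    · exact hnr k h
    · exact (List.mem_filter.1 h).1

lemma stepD_nodup_aux (L row : Int) (p : PySem.Dict Int Int) (ks : List Int)
    (nr : PySem.Dict Int Int) (hnr : nr.keys.Nodup) :
    (ks.foldl (fun nr c1 =>
        (pvMatches L row c1).foldl (fun nr c2 => nr.insert c2 (nr.getD c2 0 + p.getD c1 0)) nr)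
        nr).keys.Nodup := by
  induction ks generalizing nr with
  | nil => exact hnr
  | cons c1 ks ih =>
    simp only [List.foldl_cons]
    exact ih _ (PySem.Dict.nodup_keys_foldl_insert _ (fun d x => d.getD x 0 + p.getD c1 0) _ hnr)

lemma stepD_keys_sub (L row : Int) (p : PySem.Dict Int Int)
    (k : Int) (hk : k ∈ (pvStepD L row p).keys) : k ∈ pvRng L := by
  unfold pvStepD at hk
  exact stepD_sub_aux L row p p.keys PySem.Dict.empty (by simp) k hk

lemma stepD_keys_nodup (L row : Int) (p : PySem.Dict Int Int) : (pvStepD L row p).keys.Nodup := by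
  unfold pvStepD
  exact stepD_nodup_aux L row p p.keys PySem.Dict.empty (by simp)

lemma Afold (L : Int) (nums l : List Int) (hl : ∀ r ∈ l, r ∈ nums)
    (m : PySem.Dict (Int × Int) (List Int)) (hm : pvMinv L nums m)
    (p : PySem.Dict Int Int) (hp : ∀ k ∈ p.keys, k ∈ pvRng L) :
    (l.foldl (fun st row => st.2.keys.foldl (pvAbody row st.2) (st.1, PySem.Dict.empty)) (m, p)).2
      = l.foldl (fun p row => pvStepD L row p) p := by
  induction l generalizing m p with
  | nil => rfl
  | cons row l ih =>
    simp only [List.foldl_cons]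
    have hrow : row ∈ nums := hl row List.mem_cons_self
    have hl' : ∀ r ∈ l, r ∈ nums := fun r hr => hl r (List.mem_cons_of_mem _ hr)
    obtain ⟨h1, h2⟩ := Arow L nums row hrow p.keys hp m hm p PySem.Dict.empty
    have hpair : p.keys.foldl (pvAbody row p) (m, PySem.Dict.empty)
        = ((p.keys.foldl (pvAbody row p) (m, PySem.Dict.empty)).1, pvStepD L row p) := by
      rw [Prod.ext_iff]
      exact ⟨rfl, h2⟩
    rw [hpair]
    exact ih hl' _ h1 _ (stepD_keys_sub L row p)

lemma produced_eq (c1 c2 h : Int) : produced c1 c2 h = generate_comb c1 c2 h := rfl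

lemma Brow (L col : Int) (p : PySem.Dict Int Int) (hnd : p.keys.Nodup) :
    p.items.foldl (fun nxt q =>
        (pvRng L).foldl (fun nxt c2 =>
          if produced q.1 c2 L = col then nxt.insert c2 (nxt.getD c2 0 + q.2) else nxt) nxt)
      PySem.Dict.empty = pvStepD L col p := by
  unfold pvStepD
  rw [PySem.Dict.items_eq_map_keys p hnd 0, List.foldl_map]
  refine PySem.List.foldl_congr_mem _ _ _ _ ?_
  intro nxt k _
  show (pvRng L).foldl (fun nxt c2 =>
      if produced k c2 L = col then nxt.insert c2 (nxt.getD c2 0 + p.getD k 0) else nxt) nxt = _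
  rw [PySem.List.foldl_ite_eq_foldl_filter]
  simp only [produced_eq]
  rfl

lemma Bfold (L : Int) (cols : List Int) (p : PySem.Dict Int Int) (hnd : p.keys.Nodup) :
    cols.foldl (fun counts col =>
        counts.items.foldl (fun nxt q =>
          (pvRng L).foldl (fun nxt c2 =>
            if produced q.1 c2 L = col then nxt.insert c2 (nxt.getD c2 0 + q.2) else nxt) nxt)
          PySem.Dict.empty) p
      = cols.foldl (fun p row => pvStepD L row p) p := by
  induction cols generalizing p with
  | nil => rfl
  | cons col cols ih =>
    simp only [List.foldl_cons]
    rw [Brow L col p hnd]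
    exact ih _ (stepD_keys_nodup L col p)

lemma init_keys_sub (L : Int) : ∀ k ∈ (pvInit L).keys, k ∈ pvRng L := by
  intro k hk
  unfold pvInit at hk
  rw [PySem.Dict.keys_foldl_insert (f := fun _ _ => (1 : Int))] at hk
  rcases (PySem.Set.mem_update _ _ _).1 hk with h | h
  · simp at h
  · exact h

lemma init_keys_nodup (L : Int) : (pvInit L).keys.Nodup := by
  unfold pvInit
  exact PySem.Dict.nodup_keys_foldl_insert _ (fun _ _ => (1 : Int)) _ (by simp)

lemma sum_ite_filter (l : List Nat) (p : Nat → Bool) (f : Nat → Int) :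
    ((l.map (fun k => if p k then f k else 0)).sum) = (((l.filter p).map f).sum) := by
  induction l with
  | nil => simp
  | cons x l ih =>
    by_cases h : p x <;> simp [h, ih]

lemma min_len_pos (matrix : List (List Bool)) (h1 : matrix ≠ []) (h2 : ∀ r ∈ matrix, r ≠ []) :
    0 < pvW matrix := by
  unfold pvW
  obtain ⟨a, ha⟩ : ∃ a, (matrix.map List.length).min? = some a := by
    cases hm : (matrix.map List.length).min? with
    | none => exact absurd (by simpa using (List.min?_eq_none_iff).1 hm) h1
    | some a => exact ⟨a, rfl⟩
  have := List.min?_mem ha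
  obtain ⟨r, hr, hlen⟩ := List.mem_map.1 this
  rw [ha]
  have : r ≠ [] := h2 r hr
  have : 0 < r.length := List.length_pos_iff.2 this
  simpa [← hlen] using this

lemma zip_eq (matrix : List (List Bool)) (h1 : matrix ≠ []) :
    pyZipT matrix
      = (List.range (pvW matrix)).map (fun i => matrix.map (fun row => row.getD i false)) := by
  cases matrix with
  | nil => exact absurd rfl h1
  | cons r rs => rfl

lemma rowval_eq (row : List Bool) :
    ((PySem.List.pyRange 0 (PySem.List.len row) 1).foldl (fun tmp j =>
        if PySem.List.pyGetD row j false then tmp ++ [(1:Int) <<< j.toNat]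
        else tmp ++ [(0:Int)]) []).sum = pvRowMask row := by
  rw [PySem.List.len_eq, PySem.List.pyRange_zero_nat, List.foldl_map]
  have hite : ∀ (tmp : List Int) (c : Bool) (a b : Int),
      (if c then tmp ++ [a] else tmp ++ [b]) = tmp ++ [if c then a else b] := by
    intro tmp c a b
    split <;> rfl
  simp only [PySem.List.pyGetD_natCast, Int.toNat_natCast, hite]
  rw [PySem.List.foldl_append_singleton_eq_map]
  simp [pvRowMask]

lemma numsA_eq (matrix : List (List Bool)) (h1 : matrix ≠ []) :
    (PySem.List.pyRange 0 (PySem.List.len (pyZipT matrix)) 1).foldl (fun nums i =>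
        nums ++ [((PySem.List.pyRange 0 (PySem.List.len (PySem.List.pyGetD (pyZipT matrix) i [])) 1).foldl
          (fun tmp j =>
            if PySem.List.pyGetD (PySem.List.pyGetD (pyZipT matrix) i []) j false
            then tmp ++ [(1:Int) <<< j.toNat] else tmp ++ [(0:Int)]) []).sum]) []
      = pvCols matrix := by
  rw [zip_eq matrix h1]
  set T := (List.range (pvW matrix)).map (fun i => matrix.map (fun row => row.getD i false)) with hT
  rw [PySem.List.len_eq]
  rw [PySem.List.foldl_pyRange_zero_pyGetD' T []
    (fun acc row => acc ++ [((PySem.List.pyRange 0 (PySem.List.len row) 1).foldl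
      (fun tmp j => if PySem.List.pyGetD row j false then tmp ++ [(1:Int) <<< j.toNat]
        else tmp ++ [(0:Int)]) []).sum]) []]
  rw [PySem.List.foldl_append_singleton_eq_map]
  rw [List.map_congr_left (fun row _ => rowval_eq row)]
  simp only [List.nil_append, hT, List.map_map]
  rfl

lemma len0_eq (matrix : List (List Bool)) (h1 : matrix ≠ []) (h2 : ∀ r ∈ matrix, r ≠ []) :
    PySem.List.len ((PySem.List.pyGet? (pyZipT matrix) 0).getD []) = (matrix.length : Int) := by
  rw [zip_eq matrix h1]
  have hW : 0 < pvW matrix := min_len_pos matrix h1 h2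
  rw [PySem.List.pyGet?_zero]
  simp [hW, PySem.List.len_eq]

lemma colB_eq (matrix : List (List Bool)) (i : Nat) :
    (((PySem.List.pyRange 0 ((matrix.length : Nat) : Int) 1).filter
        (fun j => PySem.List.pyGetD (PySem.List.pyGetD matrix j []) (i : Int) false)).map
        (fun j => (1:Int) <<< j.toNat)).sum = pvColMask matrix i := by
  rw [PySem.List.pyRange_zero_nat, List.filter_map, List.map_map]
  unfold pvColMask pvRowMask
  rw [sum_ite_filter]
  simp only [List.length_map]
  have hpred : ∀ k ∈ List.range matrix.length,
      ((fun j => PySem.List.pyGetD (PySem.List.pyGetD matrix j []) (i : Int) false) ∘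
        (fun (k : Nat) => (k : Int))) k
        = (matrix.map (fun r => r.getD i false)).getD k false := by
    intro k hk
    have hk' : k < matrix.length := List.mem_range.1 hk
    simp only [Function.comp, PySem.List.pyGetD_natCast]
    simp [List.getD_eq_getElem?_getD, hk']
  rw [List.filter_congr hpred]
  refine congrArg List.sum (List.map_congr_left ?_)
  intro x hx
  simp [Int.shiftLeft_natCast_right]

lemma solution_eq (matrix : List (List Bool)) :
    solution matrix =
      (((((PySem.List.pyRange 0 (PySem.List.len (pyZipT matrix)) 1).foldl (fun nums i =>
        nums ++ [((PySem.List.pyRange 0 (PySem.List.len (PySem.List.pyGetD (pyZipT matrix) i [])) 1).foldl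
          (fun tmp j =>
            if PySem.List.pyGetD (PySem.List.pyGetD (pyZipT matrix) i []) j false
            then tmp ++ [(1:Int) <<< j.toNat] else tmp ++ [(0:Int)]) []).sum]) []).foldl
        (fun st row => st.2.keys.foldl (pvAbody row st.2) (st.1, PySem.Dict.empty))
        (mapping_fn (PySem.List.len ((PySem.List.pyGet? (pyZipT matrix) 0).getD [])) ((PySem.List.pyRange 0 (PySem.List.len (pyZipT matrix)) 1).foldl (fun nums i =>
        nums ++ [((PySem.List.pyRange 0 (PySem.List.len (PySem.List.pyGetD (pyZipT matrix) i [])) 1).foldl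
          (fun tmp j =>
            if PySem.List.pyGetD (PySem.List.pyGetD (pyZipT matrix) i []) j false
            then tmp ++ [(1:Int) <<< j.toNat] else tmp ++ [(0:Int)]) []).sum]) []), pvInit (PySem.List.len ((PySem.List.pyGet? (pyZipT matrix) 0).getD []))))).2).values.sum := rfl

lemma solution_alt_eq (matrix : List (List Bool)) :
    solution_alt matrix =
      ((PySem.List.pyRange 0 ((pvW matrix : Nat) : Int) 1).foldl (fun counts i =>
        counts.items.foldl (fun nxt p =>
            (pvRng (matrix.length : Int)).foldl (fun nxt c2 =>
              if produced p.1 c2 (matrix.length : Int) =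
                (((PySem.List.pyRange 0 ((matrix.length : Int)) 1).filter
                  (fun j => PySem.List.pyGetD (PySem.List.pyGetD matrix j []) i false)).map
                  (fun j => (1:Int) <<< j.toNat)).sum
              then nxt.insert c2 (nxt.getD c2 0 + p.2) else nxt) nxt)
          PySem.Dict.empty) (pvInit (matrix.length : Int))).values.sum := rfl

-- ===== VERDICT (by name: the statement is the Claim_ definition above) =====
theorem solution_spec : Claim_equal_solution := by
  unfold Claim_equal_solution
  intro matrix _ hpre
  obtain ⟨h1, h2⟩ := hpre
  unfold Spec_solution
  rw [solution_eq, solution_alt_eq]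
  rw [numsA_eq matrix h1, len0_eq matrix h1 h2]
  rw [Afold ((matrix.length : Int)) (pvCols matrix) (pvCols matrix) (fun r hr => hr)
      _ (mapping_fn_minv _ _) _ (init_keys_sub _)]
  rw [PySem.List.pyRange_zero_nat (pvW matrix), List.foldl_map]
  simp only [colB_eq]
  have hB : (pvCols matrix).foldl (fun x col =>
        List.foldl (fun nxt p =>
          List.foldl (fun nxt c2 =>
            if produced p.1 c2 ((matrix.length : Nat) : Int) = col
            then nxt.insert c2 (nxt.getD c2 0 + p.2) else nxt)
            nxt (pvRng ((matrix.length : Nat) : Int)))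
          PySem.Dict.empty x.items) (pvInit ((matrix.length : Nat) : Int))
      = (List.range (pvW matrix)).foldl (fun x y =>
        List.foldl (fun nxt p =>
          List.foldl (fun nxt c2 =>
            if produced p.1 c2 ((matrix.length : Nat) : Int) = pvColMask matrix y
            then nxt.insert c2 (nxt.getD c2 0 + p.2) else nxt)
            nxt (pvRng ((matrix.length : Nat) : Int)))
          PySem.Dict.empty x.items) (pvInit ((matrix.length : Nat) : Int)) := by
    unfold pvCols
    exact List.foldl_map
  rw [← hB]
  rw [Bfold _ _ _ (init_keys_nodup _)]
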